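-- pv_equiv track=rewrite | github.com/miladalg/Rendus-TD-Structure-de-donn-es | TD5.py | tableau_vers_mots
-- ===== SOURCE A (Python) =====
-- def tableau_vers_mots(tableau,n): #n le nb de fils, le tableau c'est la liste de valeurs
--     mots = []
--     for i in range(n): #pour chaque fil i
--         mot = "H"
--         f=i
--         for j in range(len(tableau)): #pour chaque valeur dans le tableau
--             if tableau[j] == f :
--                 mot+="U" #U c'est qu'on descend
--                 f+=1
--             elif tableau[j] == f-1 :
--                 mot+="D"
--                 f-=1
--             else :
--                 mot+="H"
--             mot+="H"
--         mots.append(mot)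
--     return mots
-- ===== SOURCE B (Python) =====
-- def tableau_vers_mots(tableau, n):
--     # Entry t of tableau is a crossing of the two wires currently at depths t and
--     # t+1: the wire at depth t goes Up, the one at depth t+1 goes Down, everyone
--     # else holds.  Maintain a depth->wire dict and per-wire sparse event maps,
--     # then reconstruct each word, filling non-event steps with 'H'.
--     who = {i: i for i in range(n)}   # depth -> wire currently at that depth
--     ev = {i: {} for i in range(n)}   # wire -> {step j: 'U' or 'D'}
--     for j, t in enumerate(tableau):
--         a = who.pop(t, None)
--         b = who.pop(t + 1, None)
--         if a is not None:
--             ev[a][j] = "U"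
--             who[t + 1] = a
--         if b is not None:
--             ev[b][j] = "D"
--             who[t] = b
--     L = len(tableau)
--     return ["H" + "".join(ev[i].get(j, "H") + "H" for j in range(L)) for i in range(n)]
-- ===== Notes on version B (the rewrite author's own statement) =====
-- stated objective: alternative
-- what changed: A scans the whole tableau once per word; B reinterprets each tableau entry as a crossing of the two wires currently at depths t and t+1, maintains a depth->wire dictionary plus sparse per-wire U/D event maps in one pass, and reconstructs each word from its events with 'H' defaults.
import Mathlib
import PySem

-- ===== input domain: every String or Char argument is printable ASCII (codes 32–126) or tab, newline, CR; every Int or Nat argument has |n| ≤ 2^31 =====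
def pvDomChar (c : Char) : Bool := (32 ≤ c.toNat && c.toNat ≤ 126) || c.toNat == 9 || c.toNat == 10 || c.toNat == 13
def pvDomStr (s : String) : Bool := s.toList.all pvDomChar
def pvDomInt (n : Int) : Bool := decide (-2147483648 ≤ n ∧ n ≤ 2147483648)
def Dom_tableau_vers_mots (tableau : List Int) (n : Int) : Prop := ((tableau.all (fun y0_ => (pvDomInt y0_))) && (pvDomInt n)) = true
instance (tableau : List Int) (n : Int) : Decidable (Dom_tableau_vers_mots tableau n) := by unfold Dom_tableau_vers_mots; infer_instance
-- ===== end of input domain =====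

-- B replaces A's per-wire simulation (a full scan of tableau for each of the n words) by a wire-crossing
-- algorithm: each tableau entry swaps the two wires at depths t and t+1 in a depth->wire dict, recording
-- sparse U/D events per wire, and the words are reconstructed at the end (objective: alternative).

-- ===== PORT A =====
-- one iteration of A's inner loop body on (mot, f)
def pvStepA (p : String × Int) (t : Int) : String × Int :=
  let q : String × Int :=
    if t = p.2 then (p.1 ++ "U", p.2 + 1)
    else if t = p.2 - 1 then (p.1 ++ "D", p.2 - 1)
    else (p.1 ++ "H", p.2)
  (q.1 ++ "H", q.2)

-- for i in range(n): scan tableau building mot from ("H", i), append to mots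
def tableau_vers_mots (tableau : List Int) (n : Int) : List String :=
  (PySem.List.pyRange 0 n 1).foldl
    (fun mots i => mots ++ [(tableau.foldl pvStepA ("H", i)).1]) []

-- ===== PORT B =====
-- who.pop(k, None): the popped value (or none) together with the remaining dict
def pvPopD (d : PySem.Dict Int Int) (k : Int) : Option Int × PySem.Dict Int Int :=
  match d.pop? k with
  | none => (none, d)
  | some (v, d') => (some v, d')

-- one tableau entry (j, t) = a crossing of the wires at depths t and t+1:
-- pop both, record a 'U' event for the wire at t, a 'D' event for the one at t+1, reinsert swapped
def pvCross (st : PySem.Dict Int Int × PySem.Dict Int (PySem.Dict Int String))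
    (jt : Int × Int) : PySem.Dict Int Int × PySem.Dict Int (PySem.Dict Int String) :=
  let j := jt.1
  let t := jt.2
  let pa := pvPopD st.1 t
  let pb := pvPopD pa.2 (t + 1)
  let s1 :=
    match pa.1 with
    | some a => (pb.2.insert (t + 1) a,
        -- ev[a][j] = "U"; a is always a key of ev, so modify with an empty default is exact here
        st.2.modify a PySem.Dict.empty (fun m => m.insert j "U"))
    | none => (pb.2, st.2)
  match pb.1 with
  | some b => (s1.1.insert t b,
      -- ev[b][j] = "D"; b is always a key of ev, so modify with an empty default is exact here
      s1.2.modify b PySem.Dict.empty (fun m => m.insert j "D"))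
  | none => s1

def tableau_vers_mots_alt (tableau : List Int) (n : Int) : List String :=
  let who0 : PySem.Dict Int Int :=
    (PySem.List.pyRange 0 n 1).foldl (fun d i => d.insert i i) PySem.Dict.empty
  let ev0 : PySem.Dict Int (PySem.Dict Int String) :=
    (PySem.List.pyRange 0 n 1).foldl (fun d i => d.insert i PySem.Dict.empty) PySem.Dict.empty
  let fin := (PySem.List.enumerate tableau).foldl pvCross (who0, ev0)
  let L : Int := tableau.length
  (PySem.List.pyRange 0 n 1).map (fun i =>
    -- ev[i] is always present (initialised for every i in range(n)), so getD empty is exact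
    "H" ++ PySem.Str.join "" ((PySem.List.pyRange 0 L 1).map
      (fun j => (fin.2.getD i PySem.Dict.empty).getD j "H" ++ "H")))


-- ===== PRECONDITION & SPEC =====
def Spec_tableau_vers_mots (tableau : List Int) (n : Int) (out : List String) : Prop := out = tableau_vers_mots_alt tableau n
instance (tableau : List Int) (n : Int) (out : List String) : Decidable (Spec_tableau_vers_mots tableau n out) := by unfold Spec_tableau_vers_mots; infer_instance

-- ===== CLAIM (what is proved, stated in full; the proofs are below) =====
def Claim_equal_tableau_vers_mots : Prop := ∀ (tableau : List Int) (n : Int), Dom_tableau_vers_mots tableau n → Spec_tableau_vers_mots tableau n (tableau_vers_mots tableau n)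

-- ===== LEMMAS AND PROOFS =====

-- depth-only step and fold of A's inner loop, and the letter it writes
def pvStepF (f t : Int) : Int := if t = f then f + 1 else if t = f - 1 then f - 1 else f
def pvDepth (i : Int) (p : List Int) : Int := p.foldl pvStepF i
def pvChA (f t : Int) : String := if t = f then "U" else if t = f - 1 then "D" else "H"

-- the letter wire i gets at step j, read off A's simulation
def pvEvChar (p : List Int) (i j : Int) : String :=
  if 0 ≤ j ∧ j.toNat < p.length then pvChA (pvDepth i (p.take j.toNat)) (p.getD j.toNat 0) else "H"

-- invariant on B's depth->wire dict after processing prefix p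
def pvW (n : Int) (p : List Int) (who : PySem.Dict Int Int) : Prop :=
  ∀ d i, who.get? d = some i ↔ (0 ≤ i ∧ i < n ∧ pvDepth i p = d)

-- invariant on B's event dicts after processing prefix p
def pvE (n : Int) (p : List Int) (ev : PySem.Dict Int (PySem.Dict Int String)) : Prop :=
  ∀ i j, 0 ≤ i → i < n → ((ev.getD i PySem.Dict.empty).getD j "H") = pvEvChar p i j

theorem pvDepth_append (i : Int) (p : List Int) (t : Int) :
    pvDepth i (p ++ [t]) = pvStepF (pvDepth i p) t := by simp [pvDepth]

theorem pv_find?_filter_ne {ν : Type} (r : List (Int × ν)) (k k' : Int) (h : k' ≠ k) :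
    List.find? (fun p => p.1 == k') (r.filter (fun p => !p.1 == k))
      = List.find? (fun p => p.1 == k') r := by
  induction r with
  | nil => simp
  | cons p r ih =>
    obtain ⟨pk, pv⟩ := p
    by_cases h1 : pk = k <;> by_cases h2 : pk = k' <;>
      simp_all

theorem pv_get?_erase {ν : Type} (d : PySem.Dict Int ν) (k k' : Int) :
    (d.erase k).get? k' = if k' = k then none else d.get? k' := by
  obtain ⟨items⟩ := d
  by_cases h : k' = k
  · subst h
    have : List.find? (fun p => p.1 == k') (List.filter (fun p => !p.1 == k') items) = none := by
      rw [List.find?_eq_none]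
      intro p hp
      simp [List.mem_filter] at hp
      simp [hp.2]
    simp [PySem.Dict.erase, PySem.Dict.get?, this]
  · simp [PySem.Dict.erase, PySem.Dict.get?, h, pv_find?_filter_ne items k k' h]

theorem pv_erase_of_get?_none {ν : Type} (d : PySem.Dict Int ν) (k : Int)
    (h : d.get? k = none) : d.erase k = d := by
  obtain ⟨items⟩ := d
  simp only [PySem.Dict.get?, Option.map_eq_none_iff, List.find?_eq_none] at h
  simp only [PySem.Dict.erase, PySem.Dict.mk.injEq, List.filter_eq_self]
  intro p hp
  simpa using h p hp

theorem pv_get?_foldl_insert {ν : Type} (f : Int → ν) (l : List Int) (d0 : PySem.Dict Int ν) (x : Int) :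
    (l.foldl (fun d i => d.insert i (f i)) d0).get? x
      = if x ∈ l then some (f x) else d0.get? x := by
  induction l generalizing d0 with
  | nil => simp
  | cons i l ih =>
    rw [List.foldl_cons, ih]
    by_cases hm : x ∈ l
    · simp [hm]
    · by_cases hx : x = i <;>
        simp [hm, hx, PySem.Dict.get?_insert_self, PySem.Dict.get?_insert_of_ne]

theorem pvPopD_eq (d : PySem.Dict Int Int) (k : Int) :
    pvPopD d k = (d.get? k, d.erase k) := by
  unfold pvPopD PySem.Dict.pop?
  cases h : d.get? k with
  | none => simp [pv_erase_of_get?_none d k h]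
  | some v => simp

theorem pv_intercalate_nil_eq_flatten {α : Type} (l : List (List α)) :
    List.intercalate ([] : List α) l = l.flatten := by
  induction l with
  | nil => rfl
  | cons a l ih =>
    cases l with
    | nil => simp [List.intercalate]
    | cons b t =>
      simp only [List.intercalate, List.intersperse] at ih ⊢
      simp_all

theorem pv_join_nil_cons (x : String) (l : List String) :
    PySem.Str.join "" (x :: l) = x ++ PySem.Str.join "" l := by
  simp [PySem.Str.join, PySem.Chars.join, pv_intercalate_nil_eq_flatten]

theorem pvStepA_eq (p : String × Int) (t : Int) :
    pvStepA p t = (p.1 ++ (pvChA p.2 t ++ "H"), pvStepF p.2 t) := by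
  unfold pvStepA pvChA pvStepF
  split_ifs <;> simp [String.append_assoc]

theorem pv_wordA (p : List Int) (s : String) (f : Int) :
    (p.foldl pvStepA (s, f)).1
      = s ++ PySem.Str.join "" ((List.range p.length).map
          (fun k => pvChA (pvDepth f (p.take k)) (p.getD k 0) ++ "H")) := by
  induction p generalizing s f with
  | nil =>
    show s = s ++ PySem.Str.join "" []
    rw [show PySem.Str.join "" [] = "" from rfl]
    simp
  | cons t r ih =>
    rw [List.foldl_cons, pvStepA_eq]
    rw [ih]
    rw [List.length_cons, List.range_succ_eq_map, List.map_cons, List.map_map,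
      pv_join_nil_cons]
    simp only [List.take_zero, List.getD]
    have : ∀ k, pvDepth f ((t :: r).take (k+1)) = pvDepth (pvStepF f t) (r.take k) := by
      intro k; simp [pvDepth, List.take_succ_cons]
    simp only [Function.comp_def, List.take_succ_cons]
    rw [String.append_assoc]
    congr 2

theorem pvEvChar_append (p : List Int) (t i j : Int) :
    pvEvChar (p ++ [t]) i j
      = if j = (p.length : Int) then pvChA (pvDepth i p) t else pvEvChar p i j := by
  unfold pvEvChar
  by_cases hj : j = (p.length : Int)
  · subst hj
    rw [if_pos rfl, if_pos (by simp)]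
    simp
  · rw [if_neg hj]
    by_cases hr : 0 ≤ j ∧ j.toNat < p.length
    · have hlt : j.toNat < p.length := hr.2
      rw [if_pos ⟨hr.1, by simp; omega⟩, if_pos hr,
        List.take_append_of_le_length (by omega), List.getD_append _ _ _ _ hlt]
    · rw [if_neg (by simp at hr ⊢; intro h0; have := hr h0; omega), if_neg hr]

theorem pvEvChar_len (p : List Int) (i : Int) : pvEvChar p i (p.length : Int) = "H" := by
  unfold pvEvChar
  rw [if_neg (by simp)]

theorem pvChA_U (f t : Int) (h : f = t) : pvChA f t = "U" := by
  unfold pvChA; rw [if_pos (by omega)]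

theorem pvChA_D (f t : Int) (h : f = t + 1) : pvChA f t = "D" := by
  unfold pvChA; rw [if_neg (by omega), if_pos (by omega)]

theorem pvChA_H (f t : Int) (h1 : ¬ f = t) (h2 : ¬ f = t + 1) : pvChA f t = "H" := by
  unfold pvChA; rw [if_neg (by omega), if_neg (by omega)]

theorem pvStep_inv (n t : Int) (p : List Int) (who : PySem.Dict Int Int)
    (ev : PySem.Dict Int (PySem.Dict Int String))
    (hW : pvW n p who) (hE : pvE n p ev) :
    pvW n (p ++ [t]) (pvCross (who, ev) ((p.length : Int), t)).1 ∧
    pvE n (p ++ [t]) (pvCross (who, ev) ((p.length : Int), t)).2 := by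
  have hbase : ∀ d : Int, (((who.erase t).erase (t+1)).get? d)
      = if d = t ∨ d = t + 1 then none else who.get? d := by
    intro d
    rw [pv_get?_erase, pv_get?_erase]
    split_ifs <;> simp_all
  have hb' : (who.erase t).get? (t+1) = who.get? (t+1) := by
    rw [pv_get?_erase, if_neg (show ¬ (t+1) = t by omega)]
  have hdep : ∀ i, pvDepth i (p ++ [t]) = pvStepF (pvDepth i p) t := fun i => pvDepth_append i p t
  simp only [pvCross, pvPopD_eq, hb']
  cases ha : who.get? t with
  | some a =>
    have hA := (hW t a).mp ha
    cases hb : who.get? (t+1) with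
    | some b =>
      have hB := (hW (t+1) b).mp hb
      have hab : a ≠ b := by intro h; rw [h] at hA; omega
      dsimp only
      constructor
      · intro d i
        rw [PySem.Dict.get?_insert, PySem.Dict.get?_insert, hbase, hdep i]
        constructor
        · intro h
          split_ifs at h with h1 h2 h3
          · injection h with h; subst h
            exact ⟨hB.1, hB.2.1, by unfold pvStepF; rw [if_neg (by omega), if_pos (by omega)]; omega⟩
          · injection h with h; subst h
            exact ⟨hA.1, hA.2.1, by unfold pvStepF; rw [if_pos (by omega)]; omega⟩
          · obtain ⟨hi0, hin, hdi⟩ := (hW d i).mp h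
            exact ⟨hi0, hin, by unfold pvStepF; rw [if_neg (by omega), if_neg (by omega)]; omega⟩
        · rintro ⟨hi0, hin, hdi⟩
          unfold pvStepF at hdi
          by_cases hft : t = pvDepth i p
          · rw [if_pos (by omega)] at hdi
            have hgi : who.get? t = some i := (hW t i).mpr ⟨hi0, hin, by omega⟩
            rw [ha] at hgi; injection hgi with hgi; subst hgi
            rw [if_neg (by omega), if_pos (by omega)]
          · by_cases hft2 : t = pvDepth i p - 1
            · rw [if_neg hft, if_pos (by omega)] at hdi
              have hgi : who.get? (t+1) = some i := (hW (t+1) i).mpr ⟨hi0, hin, by omega⟩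
              rw [hb] at hgi; injection hgi with hgi; subst hgi
              rw [if_pos (by omega)]
            · rw [if_neg hft, if_neg hft2] at hdi
              rw [if_neg (by omega), if_neg (by omega), if_neg (by omega)]
              exact (hW d i).mpr ⟨hi0, hin, hdi⟩
      · intro i j hi0 hin
        rw [PySem.Dict.getD_modify, pvEvChar_append]
        by_cases hib : i = b
        · subst hib
          rw [if_pos rfl, PySem.Dict.getD_insert, PySem.Dict.getD_modify,
            if_neg (show ¬ i = a by omega)]
          by_cases hj : j = (p.length : Int)
          · rw [if_pos hj, if_pos hj, pvChA_D _ _ (by omega)]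
          · rw [if_neg hj, if_neg hj, hE i j hi0 hin]
        · rw [if_neg hib, PySem.Dict.getD_modify]
          by_cases hia : i = a
          · subst hia
            rw [if_pos rfl, PySem.Dict.getD_insert]
            by_cases hj : j = (p.length : Int)
            · rw [if_pos hj, if_pos hj, pvChA_U _ _ (by omega)]
            · rw [if_neg hj, if_neg hj, hE i j hi0 hin]
          · rw [if_neg hia, hE i j hi0 hin]
            by_cases hj : j = (p.length : Int)
            · rw [if_pos hj, hj, pvEvChar_len, pvChA_H]
              · intro h; exact hia (by
                  have := (hW t i).mpr ⟨hi0, hin, by omega⟩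
                  rw [ha] at this; injection this with this; omega)
              · intro h; exact hib (by
                  have := (hW (t+1) i).mpr ⟨hi0, hin, by omega⟩
                  rw [hb] at this; injection this with this; omega)
            · rw [if_neg hj]
    | none =>
      dsimp only
      constructor
      · intro d i
        rw [PySem.Dict.get?_insert, hbase, hdep i]
        constructor
        · intro h
          split_ifs at h with h1 h2
          · injection h with h; subst h
            exact ⟨hA.1, hA.2.1, by unfold pvStepF; rw [if_pos (by omega)]; omega⟩
          · obtain ⟨hi0, hin, hdi⟩ := (hW d i).mp h
            exact ⟨hi0, hin, by unfold pvStepF; rw [if_neg (by omega), if_neg (by omega)]; omega⟩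
        · rintro ⟨hi0, hin, hdi⟩
          unfold pvStepF at hdi
          by_cases hft : t = pvDepth i p
          · rw [if_pos (by omega)] at hdi
            have hgi : who.get? t = some i := (hW t i).mpr ⟨hi0, hin, by omega⟩
            rw [ha] at hgi; injection hgi with hgi; subst hgi
            rw [if_pos (by omega)]
          · by_cases hft2 : t = pvDepth i p - 1
            · rw [if_neg hft, if_pos (by omega)] at hdi
              have hgi : who.get? (t+1) = some i := (hW (t+1) i).mpr ⟨hi0, hin, by omega⟩
              rw [hb] at hgi; cases hgi
            · rw [if_neg hft, if_neg hft2] at hdi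
              rw [if_neg (by omega), if_neg (by omega)]
              exact (hW d i).mpr ⟨hi0, hin, hdi⟩
      · intro i j hi0 hin
        rw [PySem.Dict.getD_modify, pvEvChar_append]
        by_cases hia : i = a
        · subst hia
          rw [if_pos rfl, PySem.Dict.getD_insert]
          by_cases hj : j = (p.length : Int)
          · rw [if_pos hj, if_pos hj, pvChA_U _ _ (by omega)]
          · rw [if_neg hj, if_neg hj, hE i j hi0 hin]
        · rw [if_neg hia, hE i j hi0 hin]
          by_cases hj : j = (p.length : Int)
          · rw [if_pos hj, hj, pvEvChar_len, pvChA_H]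
            · intro h; exact hia (by
                have := (hW t i).mpr ⟨hi0, hin, by omega⟩
                rw [ha] at this; injection this with this; omega)
            · intro h
              have := (hW (t+1) i).mpr ⟨hi0, hin, by omega⟩
              rw [hb] at this; cases this
          · rw [if_neg hj]
  | none =>
    cases hb : who.get? (t+1) with
    | some b =>
      have hB := (hW (t+1) b).mp hb
      dsimp only
      constructor
      · intro d i
        rw [PySem.Dict.get?_insert, hbase, hdep i]
        constructor
        · intro h
          split_ifs at h with h1 h2
          · injection h with h; subst h
            exact ⟨hB.1, hB.2.1, by unfold pvStepF; rw [if_neg (by omega), if_pos (by omega)]; omega⟩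
          · obtain ⟨hi0, hin, hdi⟩ := (hW d i).mp h
            exact ⟨hi0, hin, by unfold pvStepF; rw [if_neg (by omega), if_neg (by omega)]; omega⟩
        · rintro ⟨hi0, hin, hdi⟩
          unfold pvStepF at hdi
          by_cases hft : t = pvDepth i p
          · rw [if_pos (by omega)] at hdi
            have hgi : who.get? t = some i := (hW t i).mpr ⟨hi0, hin, by omega⟩
            rw [ha] at hgi; cases hgi
          · by_cases hft2 : t = pvDepth i p - 1
            · rw [if_neg hft, if_pos (by omega)] at hdi
              have hgi : who.get? (t+1) = some i := (hW (t+1) i).mpr ⟨hi0, hin, by omega⟩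
              rw [hb] at hgi; injection hgi with hgi; subst hgi
              rw [if_pos (by omega)]
            · rw [if_neg hft, if_neg hft2] at hdi
              rw [if_neg (by omega), if_neg (by omega)]
              exact (hW d i).mpr ⟨hi0, hin, hdi⟩
      · intro i j hi0 hin
        rw [PySem.Dict.getD_modify, pvEvChar_append]
        by_cases hib : i = b
        · subst hib
          rw [if_pos rfl, PySem.Dict.getD_insert]
          by_cases hj : j = (p.length : Int)
          · rw [if_pos hj, if_pos hj, pvChA_D _ _ (by omega)]
          · rw [if_neg hj, if_neg hj, hE i j hi0 hin]
        · rw [if_neg hib, hE i j hi0 hin]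
          by_cases hj : j = (p.length : Int)
          · rw [if_pos hj, hj, pvEvChar_len, pvChA_H]
            · intro h
              have := (hW t i).mpr ⟨hi0, hin, by omega⟩
              rw [ha] at this; cases this
            · intro h; exact hib (by
                have := (hW (t+1) i).mpr ⟨hi0, hin, by omega⟩
                rw [hb] at this; injection this with this; omega)
          · rw [if_neg hj]
    | none =>
      dsimp only
      constructor
      · intro d i
        rw [hbase, hdep i]
        constructor
        · intro h
          split_ifs at h with h1
          · obtain ⟨hi0, hin, hdi⟩ := (hW d i).mp h
            exact ⟨hi0, hin, by unfold pvStepF; rw [if_neg (by omega), if_neg (by omega)]; omega⟩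
        · rintro ⟨hi0, hin, hdi⟩
          unfold pvStepF at hdi
          by_cases hft : t = pvDepth i p
          · have hgi : who.get? t = some i := (hW t i).mpr ⟨hi0, hin, by omega⟩
            rw [ha] at hgi; cases hgi
          · by_cases hft2 : t = pvDepth i p - 1
            · have hgi : who.get? (t+1) = some i := (hW (t+1) i).mpr ⟨hi0, hin, by omega⟩
              rw [hb] at hgi; cases hgi
            · rw [if_neg hft, if_neg hft2] at hdi
              rw [if_neg (by omega)]
              exact (hW d i).mpr ⟨hi0, hin, hdi⟩
      · intro i j hi0 hin
        rw [hE i j hi0 hin, pvEvChar_append]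
        by_cases hj : j = (p.length : Int)
        · rw [if_pos hj, hj, pvEvChar_len, pvChA_H]
          · intro h
            have := (hW t i).mpr ⟨hi0, hin, by omega⟩
            rw [ha] at this; cases this
          · intro h
            have := (hW (t+1) i).mpr ⟨hi0, hin, by omega⟩
            rw [hb] at this; cases this
        · rw [if_neg hj]

theorem pvFold_inv (n : Int) (xs q : List Int) (who : PySem.Dict Int Int)
    (ev : PySem.Dict Int (PySem.Dict Int String))
    (hW : pvW n q who) (hE : pvE n q ev) :
    pvW n (q ++ xs) ((PySem.List.enumerate xs (q.length : Int)).foldl pvCross (who, ev)).1 ∧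
    pvE n (q ++ xs) ((PySem.List.enumerate xs (q.length : Int)).foldl pvCross (who, ev)).2 := by
  induction xs generalizing q who ev with
  | nil => simpa [PySem.List.enumerate] using ⟨hW, hE⟩
  | cons t xs ih =>
    rw [PySem.List.enumerate_cons, List.foldl_cons]
    have hstep := pvStep_inv n t q who ev hW hE
    have hlen : ((q ++ [t]).length : Int) = (q.length : Int) + 1 := by simp
    have := ih (q ++ [t]) (pvCross (who, ev) ((q.length : Int), t)).1
      (pvCross (who, ev) ((q.length : Int), t)).2 hstep.1 hstep.2
    rw [hlen] at this
    simpa using this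

theorem pvW_init (n : Int) :
    pvW n [] ((PySem.List.pyRange 0 n 1).foldl (fun d i => d.insert i i) PySem.Dict.empty) := by
  intro d i
  rw [pv_get?_foldl_insert (fun i => i)]
  by_cases h : d ∈ PySem.List.pyRange 0 n 1
  · have hd := PySem.List.mem_pyRange_one.mp h
    rw [if_pos h]
    constructor
    · intro he; injection he with he; subst he; exact ⟨by omega, by omega, rfl⟩
    · rintro ⟨h1, h2, h3⟩
      simp only [pvDepth, List.foldl_nil] at h3; subst h3; rfl
  · rw [if_neg h, PySem.Dict.get?_empty]
    constructor
    · intro he; simp at he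
    · rintro ⟨h1, h2, h3⟩
      simp only [pvDepth, List.foldl_nil] at h3; subst h3
      exact absurd (PySem.List.mem_pyRange_one.mpr ⟨h1, h2⟩) h

theorem pvE_init (n : Int) :
    pvE n [] ((PySem.List.pyRange 0 n 1).foldl
      (fun d i => d.insert i PySem.Dict.empty) PySem.Dict.empty) := by
  intro i j hi0 hin
  have hg : ((PySem.List.pyRange 0 n 1).foldl
      (fun d i => d.insert i PySem.Dict.empty)
      (PySem.Dict.empty : PySem.Dict Int (PySem.Dict Int String))).get? i
        = some PySem.Dict.empty := by
    rw [pv_get?_foldl_insert (fun _ => PySem.Dict.empty),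
      if_pos (PySem.List.mem_pyRange_one.mpr ⟨hi0, hin⟩)]
  rw [PySem.Dict.getD_eq_get?_getD, PySem.Dict.getD_eq_get?_getD, hg]
  simp [pvEvChar]

-- ===== VERDICT (by name: the statement is the Claim_ definition above) =====
theorem tableau_vers_mots_spec : Claim_equal_tableau_vers_mots := by
  intro tableau n _
  unfold Spec_tableau_vers_mots tableau_vers_mots tableau_vers_mots_alt
  rw [PySem.List.foldl_append_singleton_eq_map, List.nil_append]
  have hinv := pvFold_inv n tableau [] _ _ (pvW_init n) (pvE_init n)
  simp only [List.length_nil, Int.natCast_zero, List.nil_append] at hinv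
  apply List.map_congr_left
  intro i hi
  have hir := PySem.List.mem_pyRange_one.mp hi
  rw [pv_wordA]
  congr 1
  rw [PySem.List.pyRange_zero_nat tableau.length, List.map_map]
  congr 1
  apply List.map_congr_left
  intro k hk
  rw [List.mem_range] at hk
  have hc := hinv.2 i (k : Int) hir.1 hir.2
  simp only [Function.comp_apply]
  rw [hc]
  unfold pvEvChar
  rw [if_pos (by simp [hk])]
  simp
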